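-- pv_equiv track=rewrite | github.com/shakestzd/htmlgraph | src/python/htmlgraph/sessions/features.py | is_system_overhead
-- ===== SOURCE A (Python) =====
-- import fnmatch
--
-- SYSTEM_SKILLS = {"htmlgraph-tracker", "htmlgraph:htmlgraph-tracker"}
--
-- INFRASTRUCTURE_PATTERNS = [
--     ".htmlgraph/",
--     "pyproject.toml",
--     "package.json",
--     "package-lock.json",
--     "setup.py",
--     "setup.cfg",
--     "requirements.txt",
--     "requirements-dev.txt",
--     ".gitignore",
--     ".gitattributes",
--     ".editorconfig",
--     "pytest.ini",
--     "tox.ini",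
--     ".coveragerc",
--     ".github/",
--     ".gitlab-ci.yml",
--     ".travis.yml",
--     "circle.yml",
--     ".pre-commit-config.yaml",
--     "dist/",
--     "build/",
--     ".eggs/",
--     "*.egg-info/",
--     "__pycache__/",
--     "*.pyc",
--     "*.pyo",
--     "*.pyd",
--     ".vscode/",
--     ".idea/",
--     "*.swp",
--     "*.swo",
--     "*~",
--     ".DS_Store",
--     "Thumbs.db",
--     ".pytest_cache/",
--     ".coverage",
--     "htmlcov/",
--     ".tox/",
--     ".env",
--     ".env.local",
--     ".env.*.local",
--     "README.md",
--     "CONTRIBUTING.md",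
--     "LICENSE",
--     "CHANGELOG.md",
--     "docs/",
--     ".contextune/",
--     ".parallel/",
--     "node_modules/",
--     ".venv/",
--     "venv/",
-- ]
--
-- def is_system_overhead(tool: str, summary: str, file_paths: list[str]) -> bool:
--     """Determine if an activity is system overhead that shouldn't count as drift."""
--     if tool == "Skill":
--         for skill_name in SYSTEM_SKILLS:
--             if skill_name in summary.lower():
--                 return True
--
--     if file_paths:
--         for path in file_paths:
--             path_normalized = path.replace("\\", "/")
--             path_lower = path_normalized.lower()
--
--             for pattern in INFRASTRUCTURE_PATTERNS:
--                 pattern_lower = pattern.lower()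
--
--                 if pattern_lower.endswith("/"):
--                     if "*" in pattern_lower:
--                         path_parts = path_lower.split("/")
--                         for part in path_parts:
--                             if fnmatch.fnmatch(part, pattern_lower.rstrip("/")):
--                                 return True
--                     elif pattern_lower in path_lower or path_lower.startswith(
--                         pattern_lower
--                     ):
--                         return True
--                 elif "*" in pattern_lower:
--                     filename = path_lower.split("/")[-1]
--                     if fnmatch.fnmatch(filename, pattern_lower):
--                         return True
--                 else:
--                     if (
--                         path_lower.endswith(pattern_lower)
--                         or f"/{pattern_lower}" in path_lower
--                     ):
--                         return True
--
--     return False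
-- ===== SOURCE B (Python) =====
-- SYSTEM_SKILLS = {"htmlgraph-tracker", "htmlgraph:htmlgraph-tracker"}
--
-- INFRASTRUCTURE_PATTERNS = [
--     ".htmlgraph/", "pyproject.toml", "package.json", "package-lock.json",
--     "setup.py", "setup.cfg", "requirements.txt", "requirements-dev.txt",
--     ".gitignore", ".gitattributes", ".editorconfig", "pytest.ini", "tox.ini",
--     ".coveragerc", ".github/", ".gitlab-ci.yml", ".travis.yml", "circle.yml",
--     ".pre-commit-config.yaml", "dist/", "build/", ".eggs/", "*.egg-info/",
--     "__pycache__/", "*.pyc", "*.pyo", "*.pyd", ".vscode/", ".idea/", "*.swp",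
--     "*.swo", "*~", ".DS_Store", "Thumbs.db", ".pytest_cache/", ".coverage",
--     "htmlcov/", ".tox/", ".env", ".env.local", ".env.*.local", "README.md",
--     "CONTRIBUTING.md", "LICENSE", "CHANGELOG.md", "docs/", ".contextune/",
--     ".parallel/", "node_modules/", ".venv/", "venv/",
-- ]
--
--
-- def _classify():
--     """Build four shape-categorized pattern groups, once.
--
--     Every glob pattern in INFRASTRUCTURE_PATTERNS contains exactly one '*'
--     (and no '?'/'['), so a glob is stored as its (prefix, suffix) split at
--     the star and matched by prefix/suffix tests instead of fnmatch.
--     """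
--     dir_globs, plain_dirs, file_globs, plain_suffixes = [], [], [], []
--     for pat in INFRASTRUCTURE_PATTERNS:
--         p = pat.lower()
--         if p.endswith("/"):
--             if "*" in p:
--                 pre, _, suf = p.rstrip("/").partition("*")
--                 dir_globs.append((pre, suf))
--             else:
--                 plain_dirs.append(p)
--         elif "*" in p:
--             pre, _, suf = p.partition("*")
--             file_globs.append((pre, suf))
--         else:
--             plain_suffixes.append(p)
--     return dir_globs, plain_dirs, file_globs, plain_suffixes
--
--
-- def _match1(name, pre, suf):
--     """name matches the one-star glob pre + '*' + suf."""
--     return len(name) >= len(pre) + len(suf) and name.startswith(pre) and name.endswith(suf)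
--
--
-- _DIR_GLOBS, _PLAIN_DIRS, _FILE_GLOBS, _PLAIN_SUFFIXES = _classify()
--
--
-- def is_system_overhead(tool: str, summary: str, file_paths: list[str]) -> bool:
--     if tool == "Skill":
--         s = summary.lower()
--         if any(name in s for name in SYSTEM_SKILLS):
--             return True
--     for path in file_paths:
--         pl = path.replace("\\", "/").lower()
--         parts = pl.split("/")
--         if any(_match1(part, pre, suf) for (pre, suf) in _DIR_GLOBS for part in parts):
--             return True
--         if any(d in pl or pl.startswith(d) for d in _PLAIN_DIRS):
--             return True
--         filename = parts[-1]
--         if any(_match1(filename, pre, suf) for (pre, suf) in _FILE_GLOBS):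
--             return True
--         if any(pl.endswith(q) or f"/{q}" in pl for q in _PLAIN_SUFFIXES):
--             return True
--     return False
-- ===== Notes on version B (the rewrite author's own statement) =====
-- stated objective: faster
-- what changed: B classifies INFRASTRUCTURE_PATTERNS once at module load into four shape groups (dir-glob, plain-dir, file-glob, plain-suffix), storing each one-star glob as its (prefix, suffix) split, and tests each normalized path with four per-group passes using plain startswith/endswith/substring tests, instead of A's loop that re-lowers, re-classifies and fnmatch-compiles every pattern for every path.
import Mathlib
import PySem

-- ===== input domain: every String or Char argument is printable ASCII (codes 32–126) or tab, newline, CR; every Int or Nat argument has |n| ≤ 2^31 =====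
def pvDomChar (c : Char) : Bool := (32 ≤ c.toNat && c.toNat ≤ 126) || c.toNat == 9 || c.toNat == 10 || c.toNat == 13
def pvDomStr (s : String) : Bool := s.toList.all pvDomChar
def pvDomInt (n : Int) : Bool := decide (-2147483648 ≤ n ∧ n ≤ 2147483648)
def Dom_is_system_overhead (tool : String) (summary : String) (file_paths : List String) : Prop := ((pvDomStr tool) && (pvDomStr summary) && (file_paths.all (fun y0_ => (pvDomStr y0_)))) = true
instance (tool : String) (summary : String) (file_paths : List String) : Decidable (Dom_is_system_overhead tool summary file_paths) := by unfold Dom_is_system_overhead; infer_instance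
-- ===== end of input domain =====

-- B classifies the pattern list ONCE into four shape groups (dir-glob, plain-dir, file-glob,
-- plain-suffix), storing each one-star glob as its (prefix, suffix) split, then tests each path
-- with four per-group passes instead of A's re-classify-every-pattern-per-path fnmatch loop.

-- ===== shared small ports (string helpers both Pythons use) =====

-- str.rstrip("/"): drop all trailing '/' characters (exact hand port; PySem has no rstrip-with-chars).
def pvRstripSlash (s : String) : String := String.ofList ((s.toList.reverse.dropWhile (· == '/')).reverse)

-- path_lower.split("/"): sep is nonempty, so PySem.Str.split? never returns none and getD [] is exact.
def pvSplitSlash (s : String) : List String := (PySem.Str.split? s "/").getD []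

-- f"/{pat}"
def pvSlashPre (s : String) : String := String.ofList ('/' :: s.toList)

-- SYSTEM_SKILLS is a Python set; A only asks whether ANY member is a substring, which is
-- independent of the set's iteration order, so a fixed list is exact.
def pvSystemSkills : List String := ["htmlgraph-tracker", "htmlgraph:htmlgraph-tracker"]

def pvInfraPatterns : List String :=
  [".htmlgraph/", "pyproject.toml", "package.json", "package-lock.json",
   "setup.py", "setup.cfg", "requirements.txt", "requirements-dev.txt",
   ".gitignore", ".gitattributes", ".editorconfig", "pytest.ini", "tox.ini",
   ".coveragerc", ".github/", ".gitlab-ci.yml", ".travis.yml", "circle.yml",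
   ".pre-commit-config.yaml", "dist/", "build/", ".eggs/", "*.egg-info/",
   "__pycache__/", "*.pyc", "*.pyo", "*.pyd", ".vscode/", ".idea/", "*.swp",
   "*.swo", "*~", ".DS_Store", "Thumbs.db", ".pytest_cache/", ".coverage",
   "htmlcov/", ".tox/", ".env", ".env.local", ".env.*.local", "README.md",
   "CONTRIBUTING.md", "LICENSE", "CHANGELOG.md", "docs/", ".contextune/",
   ".parallel/", "node_modules/", ".venv/", "venv/"]

-- ===== PORT A =====

-- fnmatch.fnmatch on POSIX (normcase = identity): glob match where '*' matches any sequence.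
-- Exact for patterns whose only special character is '*' (true of every INFRASTRUCTURE_PATTERNS
-- entry: none contains '?' or '['); hand-written because PySem has no fnmatch.
def pvGlob (s p : List Char) : Bool :=
  match p, s with
  | [], s => s.isEmpty
  | c :: ps, [] => if c == '*' then pvGlob [] ps else false
  | c :: ps, d :: s' => if c == '*' then pvGlob (d :: s') ps || pvGlob s' (c :: ps) else (d == c) && pvGlob s' ps
termination_by p.length + s.length

def pvFnmatch (name pat : String) : Bool := pvGlob name.toList pat.toList

-- A's inner 'for pattern in INFRASTRUCTURE_PATTERNS' body (early returns become any).
def pvMatchPatA (path_lower : String) (pattern : String) : Bool :=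
  let pattern_lower := PySem.Str.lower pattern
  if PySem.Str.endswith pattern_lower "/" then
    if PySem.Str.isIn "*" pattern_lower then
      (pvSplitSlash path_lower).any (fun part => pvFnmatch part (pvRstripSlash pattern_lower))
    else
      PySem.Str.isIn pattern_lower path_lower || PySem.Str.startswith path_lower pattern_lower
  else if PySem.Str.isIn "*" pattern_lower then
    -- path_lower.split("/")[-1]: split always yields a nonempty list, so getLastD is exact
    pvFnmatch ((pvSplitSlash path_lower).getLastD "") pattern_lower
  else
    PySem.Str.endswith path_lower pattern_lower || PySem.Str.isIn (pvSlashPre pattern_lower) path_lower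

def is_system_overhead (tool : String) (summary : String) (file_paths : List String) : Bool :=
  if tool == "Skill" && pvSystemSkills.any (fun skill_name => PySem.Str.isIn skill_name (PySem.Str.lower summary)) then
    true
  else
    -- 'if file_paths:' then the path loop with early returns = any over file_paths
    file_paths.any (fun path =>
      let path_lower := PySem.Str.lower (PySem.Str.replace path "\\" "/")
      pvInfraPatterns.any (fun pattern => pvMatchPatA path_lower pattern))

-- ===== PORT B =====

-- p.partition("*") keeping pieces 1 and 3 (B only partitions patterns that contain '*', where
-- this is exact).
def pvPartStar (s : String) : String × String :=
  (String.ofList (s.toList.takeWhile (fun c => !(c == '*'))),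
   String.ofList ((s.toList.dropWhile (fun c => !(c == '*'))).drop 1))

-- _match1(name, pre, suf): name matches the one-star glob pre + '*' + suf
def pvGlob1 (name pre suf : String) : Bool :=
  decide (PySem.Str.len pre + PySem.Str.len suf ≤ PySem.Str.len name) &&
    PySem.Str.startswith name pre && PySem.Str.endswith name suf

-- _classify(): one pass over the pattern list building the four shape groups.
def pvClassify : List (String × String) × List String × List (String × String) × List String :=
  pvInfraPatterns.foldl
    (fun acc pat =>
      let p := PySem.Str.lower pat
      if PySem.Str.endswith p "/" then
        if PySem.Str.isIn "*" p then (acc.1 ++ [pvPartStar (pvRstripSlash p)], acc.2.1, acc.2.2.1, acc.2.2.2)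
        else (acc.1, acc.2.1 ++ [p], acc.2.2.1, acc.2.2.2)
      else if PySem.Str.isIn "*" p then (acc.1, acc.2.1, acc.2.2.1 ++ [pvPartStar p], acc.2.2.2)
      else (acc.1, acc.2.1, acc.2.2.1, acc.2.2.2 ++ [p]))
    ([], [], [], [])

def is_system_overhead_alt (tool : String) (summary : String) (file_paths : List String) : Bool :=
  if tool == "Skill" && pvSystemSkills.any (fun name => PySem.Str.isIn name (PySem.Str.lower summary)) then
    true
  else
    let dg := pvClassify.1
    let pd := pvClassify.2.1
    let fg := pvClassify.2.2.1
    let ps := pvClassify.2.2.2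
    file_paths.any (fun path =>
      let pl := PySem.Str.lower (PySem.Str.replace path "\\" "/")
      let parts := pvSplitSlash pl
      dg.any (fun g => parts.any (fun part => pvGlob1 part g.1 g.2)) ||
      pd.any (fun d => PySem.Str.isIn d pl || PySem.Str.startswith pl d) ||
      fg.any (fun g => pvGlob1 (parts.getLastD "") g.1 g.2) ||
      ps.any (fun q => PySem.Str.endswith pl q || PySem.Str.isIn (pvSlashPre q) pl))

-- ===== PRECONDITION & SPEC =====
def Spec_is_system_overhead (tool : String) (summary : String) (file_paths : List String) (out : Bool) : Prop := out = is_system_overhead_alt tool summary file_paths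
instance (tool : String) (summary : String) (file_paths : List String) (out : Bool) : Decidable (Spec_is_system_overhead tool summary file_paths out) := by unfold Spec_is_system_overhead; infer_instance

-- ===== CLAIM (what is proved, stated in full; the proofs are below) =====
def Claim_equal_is_system_overhead : Prop := ∀ (tool : String) (summary : String) (file_paths : List String), Dom_is_system_overhead tool summary file_paths → Spec_is_system_overhead tool summary file_paths (is_system_overhead tool summary file_paths)

-- ===== LEMMAS AND PROOFS =====

-- the pattern list, reordered into the four shape groups (dir-glob, plain-dir, file-glob, plain-suffix)
def pvG1 : List String := ["*.egg-info/"]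
def pvG2 : List String :=
  [".htmlgraph/", ".github/", "dist/", "build/", ".eggs/", "__pycache__/", ".vscode/", ".idea/",
   ".pytest_cache/", "htmlcov/", ".tox/", "docs/", ".contextune/", ".parallel/", "node_modules/",
   ".venv/", "venv/"]
def pvG3 : List String := ["*.pyc", "*.pyo", "*.pyd", "*.swp", "*.swo", "*~", ".env.*.local"]
def pvG4 : List String :=
  ["pyproject.toml", "package.json", "package-lock.json", "setup.py", "setup.cfg",
   "requirements.txt", "requirements-dev.txt", ".gitignore", ".gitattributes", ".editorconfig",
   "pytest.ini", "tox.ini", ".coveragerc", ".gitlab-ci.yml", ".travis.yml", "circle.yml",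
   ".pre-commit-config.yaml", ".DS_Store", "Thumbs.db", ".coverage", ".env", ".env.local",
   "README.md", "CONTRIBUTING.md", "LICENSE", "CHANGELOG.md"]

lemma pvInfra_perm_grouped : pvInfraPatterns.Perm (pvG1 ++ pvG2 ++ pvG3 ++ pvG4) := by decide

-- classification facts about the four groups, decided once on the literals
lemma pvG2_shape : ∀ pat ∈ pvG2, PySem.Chars.endswith (PySem.Chars.lower pat.toList) ['/'] = true ∧ PySem.Chars.isIn ['*'] (PySem.Chars.lower pat.toList) = false := by decide
lemma pvG4_shape : ∀ pat ∈ pvG4, PySem.Chars.endswith (PySem.Chars.lower pat.toList) ['/'] = false ∧ PySem.Chars.isIn ['*'] (PySem.Chars.lower pat.toList) = false := by decide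

-- B's groups are exactly the (lowered / split) four shape groups
lemma pvCls1 : pvClassify.1 = [("", ".egg-info")] := by decide
lemma pvCls2 : pvClassify.2.1 = pvG2.map (fun pat => PySem.Str.lower pat) := by decide
lemma pvCls3 : pvClassify.2.2.1 = [("", ".pyc"), ("", ".pyo"), ("", ".pyd"), ("", ".swp"), ("", ".swo"), ("", "~"), (".env.", ".local")] := by decide
lemma pvCls4 : pvClassify.2.2.2 = pvG4.map (fun pat => PySem.Str.lower pat) := by decide

-- a '*'-free glob pattern matches exactly itself
lemma pvGlob_litfree (p : List Char) (h : '*' ∉ p) : ∀ s, pvGlob s p = (s == p) := by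
  induction p with
  | nil => intro s; cases s <;> simp [pvGlob]
  | cons c ps ih =>
    intro s
    have hc : (c == '*') = false := by
      simp only [List.mem_cons, not_or] at h
      simp only [beq_eq_false_iff_ne, ne_eq]; exact fun e => h.1 e.symm
    have hps : '*' ∉ ps := by simp only [List.mem_cons, not_or] at h; exact h.2
    cases s with
    | nil => simp [pvGlob, hc]
    | cons d s' => simp [pvGlob, hc, ih hps s', List.cons_beq_cons]

-- '*' followed by a '*'-free tail matches exactly the strings with that tail as suffix
lemma pvGlob_star (p : List Char) (h : '*' ∉ p) : ∀ s, pvGlob s ('*' :: p) = decide (p <:+ s) := by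
  intro s
  induction s with
  | nil =>
    simp only [pvGlob, BEq.rfl, if_true, pvGlob_litfree p h]
    cases p <;> simp
  | cons d s' ih =>
    simp only [pvGlob, BEq.rfl, if_true, ih, pvGlob_litfree p h]
    rw [Bool.eq_iff_iff]
    simp only [Bool.or_eq_true, beq_iff_eq, decide_eq_true_eq, List.suffix_cons_iff]
    constructor
    · rintro (hx | hx)
      · exact Or.inl hx.symm
      · exact Or.inr hx
    · rintro (hx | hx)
      · exact Or.inl hx.symm
      · exact Or.inr hx

-- a one-star glob pre ++ '*' :: suf matches exactly "long enough, starts with pre, ends with suf"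
lemma pvGlob_one_star (pre suf : List Char) (hp : '*' ∉ pre) (hs : '*' ∉ suf) :
    ∀ s, pvGlob s (pre ++ '*' :: suf) =
      decide (pre <+: s ∧ suf <:+ s ∧ pre.length + suf.length ≤ s.length) := by
  induction pre with
  | nil =>
    intro s
    simp only [List.nil_append, pvGlob_star suf hs s]
    refine decide_eq_decide.mpr ?_
    exact ⟨fun h => ⟨List.nil_prefix, h, by simpa using h.length_le⟩, fun h => h.2.1⟩
  | cons c pre' ih =>
    have hc : (c == '*') = false := by
      simp only [List.mem_cons, not_or] at hp
      simp only [beq_eq_false_iff_ne, ne_eq]; exact fun e => hp.1 e.symm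
    have hpre' : '*' ∉ pre' := by simp only [List.mem_cons, not_or] at hp; exact hp.2
    intro s
    cases s with
    | nil => simp [pvGlob, hc]
    | cons d s' =>
      simp only [List.cons_append, pvGlob, hc, ih hpre' s']
      by_cases hdc : d = c
      · subst hdc
        simp only [beq_self_eq_true, Bool.true_and]
        refine decide_eq_decide.mpr ?_
        constructor
        · rintro ⟨h1, h2, h3⟩
          exact ⟨List.cons_prefix_cons.mpr ⟨rfl, h1⟩, h2.trans (List.suffix_cons d s'),
            by simp; omega⟩
        · rintro ⟨h1, h2, h3⟩
          rcases List.cons_prefix_cons.mp h1 with ⟨-, h1'⟩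
          simp only [List.length_cons] at h3
          rcases List.suffix_cons_iff.mp h2 with h2' | h2'
          · exfalso; have := congrArg List.length h2'; simp at this; omega
          · exact ⟨h1', h2', by omega⟩
      · have : (d == c) = false := by simp [hdc]
        simp only [this, Bool.false_and]
        have : ¬ (c :: pre' <+: d :: s') := fun hpf => hdc (List.cons_prefix_cons.mp hpf).1.symm
        simp [this]

-- fnmatch of a one-star pattern is B's _match1 prefix/suffix test
lemma pvFnmatch_eq_glob1 (name pat pre suf : String)
    (hsplit : pat.toList = pre.toList ++ '*' :: suf.toList)
    (hp : '*' ∉ pre.toList) (hs : '*' ∉ suf.toList) :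
    pvFnmatch name pat = pvGlob1 name pre suf := by
  unfold pvFnmatch pvGlob1
  rw [hsplit, pvGlob_one_star pre.toList suf.toList hp hs]
  rw [Bool.eq_iff_iff]
  simp only [Bool.and_eq_true, decide_eq_true_eq, PySem.Str.startswith_eq, PySem.Str.endswith_eq,
    PySem.Chars.startswith_iff, PySem.Chars.endswith_iff, PySem.Str.len_eq]
  constructor
  · rintro ⟨h1, h2, h3⟩
    exact ⟨⟨by omega, h1⟩, h2⟩
  · rintro ⟨⟨h3, h1⟩, h2⟩
    exact ⟨h1, h2, by omega⟩

-- A's per-pattern test, on a dir-glob pattern, is B's dir-glob rule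
lemma pvMatchPatA_dg (pl pat pre suf : String)
    (h1 : PySem.Str.endswith (PySem.Str.lower pat) "/" = true)
    (h2 : PySem.Str.isIn "*" (PySem.Str.lower pat) = true)
    (hsplit : (pvRstripSlash (PySem.Str.lower pat)).toList = pre.toList ++ '*' :: suf.toList)
    (hp : '*' ∉ pre.toList) (hs : '*' ∉ suf.toList) :
    pvMatchPatA pl pat = (pvSplitSlash pl).any (fun part => pvGlob1 part pre suf) := by
  simp only [pvMatchPatA, h1, h2, if_true]
  refine PySem.List.any_congr_mem ?_
  intro part _
  exact pvFnmatch_eq_glob1 part _ pre suf hsplit hp hs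

-- A's per-pattern test, on a file-glob pattern, is B's file-glob rule
lemma pvMatchPatA_fg (pl pat pre suf : String)
    (h1 : PySem.Str.endswith (PySem.Str.lower pat) "/" = false)
    (h2 : PySem.Str.isIn "*" (PySem.Str.lower pat) = true)
    (hsplit : (PySem.Str.lower pat).toList = pre.toList ++ '*' :: suf.toList)
    (hp : '*' ∉ pre.toList) (hs : '*' ∉ suf.toList) :
    pvMatchPatA pl pat = pvGlob1 ((pvSplitSlash pl).getLastD "") pre suf := by
  simp only [pvMatchPatA, h1, h2, if_true, Bool.false_eq_true, if_false]
  exact pvFnmatch_eq_glob1 _ _ pre suf hsplit hp hs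

-- per-path: A's scan of the full pattern list equals B's four grouped scans
lemma pvPerPath (pl : String) :
    pvInfraPatterns.any (fun pattern => pvMatchPatA pl pattern) =
    (pvClassify.1.any (fun g => (pvSplitSlash pl).any (fun part => pvGlob1 part g.1 g.2)) ||
     pvClassify.2.1.any (fun d => PySem.Str.isIn d pl || PySem.Str.startswith pl d) ||
     pvClassify.2.2.1.any (fun g => pvGlob1 ((pvSplitSlash pl).getLastD "") g.1 g.2) ||
     pvClassify.2.2.2.any (fun q => PySem.Str.endswith pl q || PySem.Str.isIn (pvSlashPre q) pl)) := by
  have e1 : pvG1.any (fun pattern => pvMatchPatA pl pattern)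
      = (pvSplitSlash pl).any (fun part => pvGlob1 part "" ".egg-info") := by
    simp only [pvG1, List.any_cons, List.any_nil, Bool.or_false]
    exact pvMatchPatA_dg pl "*.egg-info/" "" ".egg-info" (by decide) (by decide) (by decide)
      (by decide) (by decide)
  have e2 : pvG2.any (fun pattern => pvMatchPatA pl pattern)
      = pvG2.any (fun pat => PySem.Str.isIn (PySem.Str.lower pat) pl || PySem.Str.startswith pl (PySem.Str.lower pat)) := by
    refine PySem.List.any_congr_mem ?_
    intro pat hp
    simp [pvMatchPatA, (pvG2_shape pat hp).1, (pvG2_shape pat hp).2]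
  have e3 : pvG3.any (fun pattern => pvMatchPatA pl pattern)
      = ([("", ".pyc"), ("", ".pyo"), ("", ".pyd"), ("", ".swp"), ("", ".swo"), ("", "~"), (".env.", ".local")] : List (String × String)).any
          (fun g => pvGlob1 ((pvSplitSlash pl).getLastD "") g.1 g.2) := by
    simp only [pvG3, List.any_cons, List.any_nil]
    rw [pvMatchPatA_fg pl "*.pyc" "" ".pyc" (by decide) (by decide) (by decide) (by decide) (by decide),
        pvMatchPatA_fg pl "*.pyo" "" ".pyo" (by decide) (by decide) (by decide) (by decide) (by decide),
        pvMatchPatA_fg pl "*.pyd" "" ".pyd" (by decide) (by decide) (by decide) (by decide) (by decide),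
        pvMatchPatA_fg pl "*.swp" "" ".swp" (by decide) (by decide) (by decide) (by decide) (by decide),
        pvMatchPatA_fg pl "*.swo" "" ".swo" (by decide) (by decide) (by decide) (by decide) (by decide),
        pvMatchPatA_fg pl "*~" "" "~" (by decide) (by decide) (by decide) (by decide) (by decide),
        pvMatchPatA_fg pl ".env.*.local" ".env." ".local" (by decide) (by decide) (by decide) (by decide) (by decide)]
  have e4 : pvG4.any (fun pattern => pvMatchPatA pl pattern)
      = pvG4.any (fun pat => PySem.Str.endswith pl (PySem.Str.lower pat) || PySem.Str.isIn (pvSlashPre (PySem.Str.lower pat)) pl) := by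
    refine PySem.List.any_congr_mem ?_
    intro pat hp
    simp [pvMatchPatA, (pvG4_shape pat hp).1, (pvG4_shape pat hp).2]
  rw [pvInfra_perm_grouped.any_eq, List.any_append, List.any_append, List.any_append,
      e1, e2, e3, e4, pvCls1, pvCls2, pvCls3, pvCls4]
  simp only [List.any_map, Bool.or_assoc, List.any_cons, List.any_nil, Bool.or_false]
  rfl

-- ===== VERDICT (by name: the statement is the Claim_ definition above) =====
theorem is_system_overhead_spec : Claim_equal_is_system_overhead := by
  intro tool summary file_paths _
  unfold Spec_is_system_overhead is_system_overhead is_system_overhead_alt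
  split
  · rfl
  · simp only []
    refine congrArg _ ?_
    funext path
    exact pvPerPath _
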